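-- pv_equiv track=rewrite | github.com/YongjoonSeo/What_I_Studied | python/bojprobs/swtest_pdf_list/int19_2564.py | cntclock
-- ===== SOURCE A (Python) =====
-- def cntclock(currentseq, xmax, ymax): # 시계 방향 기준, current: seq
--     idx = currentseq
--     if idx in [[ymax, i] for i in range(xmax)]: # 2
--         return [0, 1]
--     elif idx in [[i, 0] for i in range(ymax)]: # 3
--         return [1, 0]
--     elif idx in [[0, i] for i in range(1, xmax+1)]: # 1
--         return [0, -1]
--     else: # 4
--         return [-1, 0]
-- ===== SOURCE B (Python) =====
-- def cntclock(currentseq, xmax, ymax):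
--     # Table-driven: compute the edge index k once, then look the direction up.
--     DIRS = [[0, 1], [1, 0], [0, -1], [-1, 0]]
--     k = 3
--     if len(currentseq) == 2:
--         a, b = currentseq
--         edges = [
--             a == ymax and 0 <= b < xmax,   # edge 2 (top)
--             b == 0 and 0 <= a < ymax,      # edge 3 (left)
--             a == 0 and 1 <= b <= xmax,     # edge 1 (bottom)
--         ]
--         k = next((i for i, hit in enumerate(edges) if hit), 3)
--     return DIRS[k]
-- ===== Notes on version B (the rewrite author's own statement) =====
-- stated objective: faster
-- what changed: Replaces the early-return chain over three generated-and-scanned O(xmax+ymax) coordinate lists with a table formulation: an O(1) edge-index k is computed from the point's components (first true predicate via next/enumerate) and the direction is looked up in a fixed 4-entry table.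
import Mathlib
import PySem

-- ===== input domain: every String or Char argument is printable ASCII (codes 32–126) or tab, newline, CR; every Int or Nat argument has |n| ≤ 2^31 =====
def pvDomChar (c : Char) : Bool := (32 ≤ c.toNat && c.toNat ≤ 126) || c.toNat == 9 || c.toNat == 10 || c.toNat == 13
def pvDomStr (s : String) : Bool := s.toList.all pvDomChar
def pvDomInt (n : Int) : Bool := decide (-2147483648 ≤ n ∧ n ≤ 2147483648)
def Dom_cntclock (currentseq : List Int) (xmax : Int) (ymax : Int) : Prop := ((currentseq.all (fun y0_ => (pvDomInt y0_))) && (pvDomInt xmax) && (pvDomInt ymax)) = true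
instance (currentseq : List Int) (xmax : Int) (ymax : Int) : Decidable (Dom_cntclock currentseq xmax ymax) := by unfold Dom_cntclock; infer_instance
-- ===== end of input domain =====

-- B is table-driven: it computes an O(1) edge index and looks the direction up in a fixed
-- 4-entry table, instead of A's early-return chain scanning three O(xmax+ymax) lists (objective: faster).

-- ===== PORT A =====
def cntclock (currentseq : List Int) (xmax : Int) (ymax : Int) : List Int :=
  let idx := currentseq
  if idx ∈ (PySem.List.pyRange 0 xmax 1).map (fun i => [ymax, i]) then [0, 1]
  else if idx ∈ (PySem.List.pyRange 0 ymax 1).map (fun i => [i, 0]) then [1, 0]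
  else if idx ∈ (PySem.List.pyRange 1 (xmax + 1) 1).map (fun i => [(0 : Int), i]) then [0, -1]
  else [-1, 0]

-- ===== PORT B =====
-- next((i for i, hit in enumerate(edges) if hit), 3): index of first true entry, default 3
def cntclockFirstTrue (i : Nat) : List Bool → Nat
  | [] => 3
  | hit :: rest => if hit then i else cntclockFirstTrue (i + 1) rest

def cntclock_alt (currentseq : List Int) (xmax : Int) (ymax : Int) : List Int :=
  let DIRS : List (List Int) := [[0, 1], [1, 0], [0, -1], [-1, 0]]
  let k : Nat :=
    match currentseq with
    | [a, b] =>
      let edges : List Bool :=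
        [a == ymax && 0 ≤ b && b < xmax,
         b == 0 && 0 ≤ a && a < ymax,
         a == 0 && 1 ≤ b && b ≤ xmax]
      cntclockFirstTrue 0 edges
    | _ => 3
  -- DIRS[k]: k is always in range; getD makes the same lookup total
  (DIRS[k]?).getD []

-- ===== PRECONDITION & SPEC =====
def Spec_cntclock (currentseq : List Int) (xmax : Int) (ymax : Int) (out : List Int) : Prop := out = cntclock_alt currentseq xmax ymax
instance (currentseq : List Int) (xmax : Int) (ymax : Int) (out : List Int) : Decidable (Spec_cntclock currentseq xmax ymax out) := by unfold Spec_cntclock; infer_instance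

-- ===== CLAIM (what is proved, stated in full; the proofs are below) =====
def Claim_equal_cntclock : Prop := ∀ (currentseq : List Int) (xmax : Int) (ymax : Int), Dom_cntclock currentseq xmax ymax → Spec_cntclock currentseq xmax ymax (cntclock currentseq xmax ymax)

-- ===== LEMMAS AND PROOFS =====

-- ===== VERDICT (by name: the statement is the Claim_ definition above) =====
theorem cntclock_spec : Claim_equal_cntclock := by
  intro currentseq xmax ymax _
  unfold Spec_cntclock
  rcases currentseq with _ | ⟨a, _ | ⟨b, _ | ⟨c, rest⟩⟩⟩
  · simp [cntclock, cntclock_alt, List.mem_map]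
  · simp [cntclock, cntclock_alt, List.mem_map]
  · simp [cntclock, cntclock_alt, cntclockFirstTrue, List.mem_map, PySem.List.mem_pyRange_one]
    split_ifs <;> first | rfl | omega
  · simp [cntclock, cntclock_alt, List.mem_map]
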